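-- pv_equiv track=rewrite | github.com/Tsarcasm831/Temp | py/anime_to_markdown.py | find_infobox_span
-- ===== SOURCE A (Python) =====
-- from typing import Dict, Iterable, List, Optional, Tuple
--
-- def find_infobox_span(wikitext: str) -> Optional[Tuple[int, int]]:
--     lower = wikitext.lower()
--     start = lower.find("{{infobox/jutsu")
--     if start == -1:
--         return None
--     i, depth, n = start, 0, len(wikitext)
--     while i < n - 1:
--         if wikitext[i] == '{' and wikitext[i+1] == '{':
--             depth += 1
--             i += 2
--             continue
--         if wikitext[i] == '}' and wikitext[i+1] == '}':
--             depth -= 1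
--             i += 2
--             if depth <= 0:
--                 return (start, i)
--             continue
--         i += 1
--     return (start, n)
-- ===== SOURCE B (Python) =====
-- def find_infobox_span(wikitext):
--     start = wikitext.lower().find("{{infobox/jutsu")
--     if start == -1:
--         return None
--     n = len(wikitext)
--     pos, depth = start, 0
--     while True:
--         o = wikitext.find('{{', pos)
--         c = wikitext.find('}}', pos)
--         if o == -1 and c == -1:
--             return (start, n)
--         if o != -1 and (c == -1 or o < c):
--             depth += 1
--             pos = o + 2
--         else:
--             depth -= 1
--             pos = c + 2
--             if depth <= 0:
--                 return (start, pos)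
-- ===== Notes on version B (the rewrite author's own statement) =====
-- stated objective: alternative
-- what changed: Replaces A's character-by-character depth scan with a loop that repeatedly jumps to the next opening or closing double-brace token via str.find with a start position, updating the brace depth per token instead of per character.
import Mathlib
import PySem

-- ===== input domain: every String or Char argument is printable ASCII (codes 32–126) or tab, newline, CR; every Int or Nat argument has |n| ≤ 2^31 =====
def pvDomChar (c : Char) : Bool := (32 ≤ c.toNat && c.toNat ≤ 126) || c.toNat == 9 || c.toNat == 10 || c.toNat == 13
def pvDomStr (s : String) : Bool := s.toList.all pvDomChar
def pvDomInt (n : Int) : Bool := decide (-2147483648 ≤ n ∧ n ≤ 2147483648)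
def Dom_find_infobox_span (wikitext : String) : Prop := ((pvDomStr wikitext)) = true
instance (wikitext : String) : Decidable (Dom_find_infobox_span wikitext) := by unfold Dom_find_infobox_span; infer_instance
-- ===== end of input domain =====

-- B replaces A's char-by-char depth scan with a repeated search for the next opening/closing double-brace
-- token (str.find with a start position); return values are identical on every input.

-- ===== PORT A =====
-- the while-loop of A: i, depth as in the Python; returns the second component of the result pair
def scanA (s : List Char) (i : Nat) (depth : Int) : Nat :=
  if _h : i < s.length - 1 then
    if s.getD i ' ' = '{' ∧ s.getD (i+1) ' ' = '{' then
      scanA s (i+2) (depth+1)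
    else if s.getD i ' ' = '}' ∧ s.getD (i+1) ' ' = '}' then
      (if depth - 1 ≤ 0 then i + 2 else scanA s (i+2) (depth-1))
    else scanA s (i+1) depth
  else s.length
termination_by s.length - i
decreasing_by all_goals omega

def find_infobox_span (wikitext : String) : Option (Int × Int) :=
  let s := wikitext.toList
  let start := PySem.Chars.find (PySem.Chars.lower s) ("{{infobox/jutsu".toList)
  if start = -1 then none
  else some (start, (scanA s start.toNat 0 : Int))

-- ===== PORT B =====
-- the while True loop of B; fuel only makes the recursion structural (each step moves pos forward by ≥ 2,
-- so fuel s.length+1 is never exhausted); returns the second component of the result pair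
def scanB (s : List Char) (fuel : Nat) (pos : Nat) (depth : Int) : Nat :=
  match fuel with
  | 0 => s.length
  | f+1 =>
    let o := PySem.Chars.findFrom s ['{','{'] (pos : Int)
    let c := PySem.Chars.findFrom s ['}','}'] (pos : Int)
    if o = -1 ∧ c = -1 then s.length
    else if o ≠ -1 ∧ (c = -1 ∨ o < c) then scanB s f (o.toNat + 2) (depth + 1)
    else if depth - 1 ≤ 0 then c.toNat + 2
    else scanB s f (c.toNat + 2) (depth - 1)

def find_infobox_span_alt (wikitext : String) : Option (Int × Int) :=
  let s := wikitext.toList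
  let start := PySem.Chars.find (PySem.Chars.lower s) ("{{infobox/jutsu".toList)
  if start = -1 then none
  else some (start, (scanB s (s.length + 1) start.toNat 0 : Int))

-- ===== PRECONDITION & SPEC =====
def Spec_find_infobox_span (wikitext : String) (out : Option (Int × Int)) : Prop := out = find_infobox_span_alt wikitext
instance (wikitext : String) (out : Option (Int × Int)) : Decidable (Spec_find_infobox_span wikitext out) := by unfold Spec_find_infobox_span; infer_instance

-- ===== CLAIM (what is proved, stated in full; the proofs are below) =====
def Claim_equal_find_infobox_span : Prop := ∀ (wikitext : String), Dom_find_infobox_span wikitext → Spec_find_infobox_span wikitext (find_infobox_span wikitext)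

-- ===== LEMMAS AND PROOFS =====

-- a two-char token is a prefix of s.drop i iff the two chars sit at i, i+1
lemma prefix_pair_iff (s : List Char) (a b : Char) (i : Nat) (h : i + 1 < s.length) :
    [a, b] <+: s.drop i ↔ (s.getD i ' ' = a ∧ s.getD (i+1) ' ' = b) := by
  rw [List.getD_eq_getElem s ' ' (by omega : i < s.length),
      List.getD_eq_getElem s ' ' (by omega : i + 1 < s.length),
      List.drop_eq_getElem_cons (by omega : i < s.length),
      List.drop_eq_getElem_cons (by omega : i + 1 < s.length),
      List.cons_prefix_cons, List.cons_prefix_cons]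
  constructor
  · rintro ⟨h1, h2, _⟩; exact ⟨h1.symm, h2.symm⟩
  · rintro ⟨h1, h2⟩; exact ⟨h1.symm, h2.symm, List.nil_prefix⟩

lemma prefix_pair_length (s : List Char) (a b : Char) (i : Nat) (h : [a, b] <+: s.drop i) :
    i + 2 ≤ s.length := by
  have := h.length_le
  simp [List.length_drop] at this
  omega

lemma find_eq_zero_of_prefix (l tok : List Char) (h : tok <+: l) :
    PySem.Chars.find l tok = 0 := by
  have h0 : 0 ≤ PySem.Chars.find l tok := (PySem.Chars.find_nonneg_iff l tok).mpr h.isInfix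
  obtain ⟨_, hmin⟩ := PySem.Chars.find_spec h0
  by_contra hne
  have hpos : 0 < (PySem.Chars.find l tok).toNat := by omega
  exact hmin 0 hpos (by simpa using h)

lemma findFrom_self (s tok : List Char) (i : Nat) (hi : i ≤ s.length)
    (h : tok <+: s.drop i) : PySem.Chars.findFrom s tok (i : Int) = (i : Int) := by
  rw [PySem.Chars.findFrom_natCast s tok i hi, find_eq_zero_of_prefix _ _ h]
  norm_num

lemma find_cons_of_not_prefix (c : Char) (l tok : List Char) (h : ¬ tok <+: c :: l) :
    PySem.Chars.find (c :: l) tok =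
      if PySem.Chars.find l tok = -1 then -1 else 1 + PySem.Chars.find l tok := by
  by_cases hn : PySem.Chars.find l tok = -1
  · rw [if_pos hn]
    rw [PySem.Chars.find_eq_neg_one_iff] at hn ⊢
    intro hinf
    rcases List.infix_cons_iff.mp hinf with hp | hi
    · exact h hp
    · exact hn hi
  · rw [if_neg hn]
    have h0 : 0 ≤ PySem.Chars.find l tok := by
      have := PySem.Chars.neg_one_le_find l tok; omega
    obtain ⟨hpref, hmin⟩ := PySem.Chars.find_spec h0
    set j := (PySem.Chars.find l tok).toNat with hj
    have hinf : tok <:+: c :: l :=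
      List.infix_cons_iff.mpr (Or.inr (hpref.isInfix.trans (List.drop_suffix j l).isInfix))
    have h0' : 0 ≤ PySem.Chars.find (c :: l) tok := (PySem.Chars.find_nonneg_iff _ _).mpr hinf
    obtain ⟨hpref', hmin'⟩ := PySem.Chars.find_spec h0'
    set m := (PySem.Chars.find (c :: l) tok).toNat with hm
    have hm0 : m ≠ 0 := by
      intro h0m
      apply h; simpa [h0m] using hpref'
    have hdrop : (c :: l).drop m = l.drop (m - 1) := by
      obtain ⟨m', hm'⟩ : ∃ m', m = m' + 1 := ⟨m - 1, by omega⟩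
      rw [hm']
      simp
    have hmj : m - 1 = j := by
      by_contra hne
      rcases Nat.lt_or_ge (m - 1) j with hlt | hge
      · exact hmin (m - 1) hlt (hdrop ▸ hpref')
      · have : j + 1 < m := by omega
        exact hmin' (j + 1) this (by simpa using hpref)
    omega

lemma findFrom_succ (s tok : List Char) (i : Nat) (hi : i < s.length)
    (h : ¬ tok <+: s.drop i) :
    PySem.Chars.findFrom s tok (i : Int) = PySem.Chars.findFrom s tok ((i + 1 : Nat) : Int) := by
  rw [PySem.Chars.findFrom_natCast s tok i (by omega),
      PySem.Chars.findFrom_natCast s tok (i+1) (by omega)]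
  rw [List.drop_eq_getElem_cons hi] at h
  rw [show (List.drop i s) = s[i] :: List.drop (i+1) s from List.drop_eq_getElem_cons hi]
  rw [find_cons_of_not_prefix _ _ _ h]
  by_cases hn : PySem.Chars.find (s.drop (i+1)) tok = -1
  · simp [hn]
  · have h0 : 0 ≤ PySem.Chars.find (s.drop (i+1)) tok := by
      have := PySem.Chars.neg_one_le_find (s.drop (i+1)) tok; omega
    rw [if_neg hn,
        if_neg (by omega : ¬(1 + PySem.Chars.find (s.drop (i+1)) tok = -1)),
        if_neg hn]
    push_cast; ring

lemma findFrom_none_of_short (s tok : List Char) (i : Nat) (hi : i ≤ s.length)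
    (hlen : 2 ≤ tok.length) (h : s.length ≤ i + 1) :
    PySem.Chars.findFrom s tok (i : Int) = -1 := by
  rw [PySem.Chars.findFrom_natCast_eq_neg_one_iff s tok i hi]
  intro hinf
  have := hinf.length_le
  simp [List.length_drop] at this
  omega

-- if findFrom at pos is nonnegative and tok is NOT a prefix right at pos, the result is > pos
lemma findFrom_pos_cases (s tok : List Char) (i : Nat) (hi : i ≤ s.length)
    (hne : PySem.Chars.findFrom s tok (i : Int) ≠ -1) :
    (i : Int) ≤ PySem.Chars.findFrom s tok (i : Int) ∧
      tok <+: s.drop (PySem.Chars.findFrom s tok (i : Int)).toNat :=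
  ⟨(PySem.Chars.findFrom_natCast_spec s tok i hi hne).1,
   (PySem.Chars.findFrom_natCast_spec s tok i hi hne).2.1⟩

lemma not_both_tokens (l : List Char) (h1 : ['{','{'] <+: l) (h2 : ['}','}'] <+: l) : False := by
  obtain ⟨t1, ht1⟩ := h1
  obtain ⟨t2, ht2⟩ := h2
  rw [← ht1] at ht2
  simp at ht2

-- the heart of the file: A's char scan equals B's token-search loop
lemma scan_eq (s : List Char) : ∀ (k i : Nat) (m : Nat) (d : Int),
    s.length - i ≤ k → i ≤ s.length → s.length - i ≤ 2 * m →
    scanA s i d = scanB s m i d := by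
  intro k
  induction k with
  | zero =>
    intro i m d hk hi _
    have hieq : s.length ≤ i + 1 := by omega
    rw [scanA, dif_neg (show ¬ i < s.length - 1 by omega)]
    match m with
    | 0 => rfl
    | f+1 =>
      rw [scanB]
      rw [if_pos ⟨findFrom_none_of_short s _ i hi (by decide) hieq,
                  findFrom_none_of_short s _ i hi (by decide) hieq⟩]
  | succ k ih =>
    intro i m d hk hi hm
    by_cases hshort : s.length ≤ i + 1
    · -- same as the base case: no room for any 2-char token at or after i
      rw [scanA, dif_neg (show ¬ i < s.length - 1 by omega)]
      match m with
      | 0 => rfl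
      | f+1 =>
        rw [scanB]
        rw [if_pos ⟨findFrom_none_of_short s _ i hi (by decide) hshort,
                    findFrom_none_of_short s _ i hi (by decide) hshort⟩]
    · have hlt : i + 1 < s.length := by omega
      have hm1 : ∃ f, m = f + 1 := ⟨m - 1, by omega⟩
      obtain ⟨f, rfl⟩ := hm1
      by_cases hopen : ['{','{'] <+: s.drop i
      · -- case {{ at i
        have ho : PySem.Chars.findFrom s ['{','{'] (i : Int) = (i : Int) :=
          findFrom_self s _ i hi hopen
        rw [scanA, dif_pos (show i < s.length - 1 by omega),
            if_pos ((prefix_pair_iff s '{' '{' i hlt).mp hopen)]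
        rw [scanB]
        simp only [ho]
        have hoc : PySem.Chars.findFrom s ['}','}'] (i:Int) = -1 ∨
            (i : Int) < PySem.Chars.findFrom s ['}','}'] (i:Int) := by
          by_cases hc : PySem.Chars.findFrom s ['}','}'] (i:Int) = -1
          · exact Or.inl hc
          · obtain ⟨hge, hpref⟩ := findFrom_pos_cases s _ i hi hc
            right
            rcases lt_or_eq_of_le hge with h | h
            · exact h
            · exfalso
              apply not_both_tokens (s.drop i) hopen
              have : ((PySem.Chars.findFrom s ['}','}'] (i:Int)).toNat) = i := by omega
              rwa [this] at hpref
        rw [if_neg (show ¬((i:Int) = -1 ∧ PySem.Chars.findFrom s ['}','}'] (i:Int) = -1) from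
              by rintro ⟨h1, _⟩; omega),
            if_pos (show (i:Int) ≠ -1 ∧ (PySem.Chars.findFrom s ['}','}'] (i:Int) = -1 ∨
              (i:Int) < PySem.Chars.findFrom s ['}','}'] (i:Int)) from ⟨by omega, hoc⟩)]
        have : ((i : Int).toNat) = i := by omega
        rw [this]
        exact ih (i+2) f (d+1) (by omega) (prefix_pair_length s _ _ i hopen) (by omega)
      · by_cases hclose : ['}','}'] <+: s.drop i
        · -- case }} at i (and not {{)
          have hc : PySem.Chars.findFrom s ['}','}'] (i : Int) = (i : Int) :=
            findFrom_self s _ i hi hclose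
          rw [scanA, dif_pos (show i < s.length - 1 by omega),
              if_neg (by rw [prefix_pair_iff s '{' '{' i hlt] at hopen; exact hopen),
              if_pos ((prefix_pair_iff s '}' '}' i hlt).mp hclose)]
          rw [scanB]
          simp only [hc]
          have hno : ¬ (PySem.Chars.findFrom s ['{','{'] (i:Int) ≠ -1 ∧
              ((i:Int) = -1 ∨ PySem.Chars.findFrom s ['{','{'] (i:Int) < (i:Int))) := by
            rintro ⟨h1, h2⟩
            rcases h2 with h2 | h2
            · omega
            · obtain ⟨hge, hpref⟩ := findFrom_pos_cases s _ i hi h1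
              rcases lt_or_eq_of_le hge with h | h
              · omega
              · apply not_both_tokens (s.drop i) _ hclose
                have : ((PySem.Chars.findFrom s ['{','{'] (i:Int)).toNat) = i := by omega
                rwa [this] at hpref
          rw [if_neg (show ¬(PySem.Chars.findFrom s ['{','{'] (i:Int) = -1 ∧ (i:Int) = -1) from
              by rintro ⟨_, h2⟩; omega),
              if_neg hno]
          have htn : ((i : Int).toNat) = i := by omega
          by_cases hd : d - 1 ≤ 0
          · rw [if_pos hd, if_pos hd, htn]
          · rw [if_neg hd, if_neg hd, htn]
            exact ih (i+2) f (d-1) (by omega) (prefix_pair_length s _ _ i hclose) (by omega)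
        · -- neither token at i: A steps one char, B's finds are unchanged
          have ho := findFrom_succ s ['{','{'] i (by omega) hopen
          have hc := findFrom_succ s ['}','}'] i (by omega) hclose
          rw [scanA, dif_pos (show i < s.length - 1 by omega),
              if_neg (by rw [prefix_pair_iff s '{' '{' i hlt] at hopen; exact hopen),
              if_neg (by rw [prefix_pair_iff s '}' '}' i hlt] at hclose; exact hclose)]
          have hstep : scanB s (f+1) i d = scanB s (f+1) (i+1) d := by
            conv_lhs => rw [scanB]
            conv_rhs => rw [scanB]
            simp only [ho, hc]
          rw [hstep]
          exact ih (i+1) (f+1) d (by omega) (by omega) (by omega)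

-- ===== VERDICT (by name: the statement is the Claim_ definition above) =====
theorem find_infobox_span_spec : Claim_equal_find_infobox_span := by
  intro wikitext _
  unfold Spec_find_infobox_span find_infobox_span find_infobox_span_alt
  simp only []
  set s := wikitext.toList
  set start := PySem.Chars.find (PySem.Chars.lower s) ("{{infobox/jutsu".toList) with hstart
  by_cases h : start = -1
  · rw [if_pos h, if_pos h]
  · rw [if_neg h, if_neg h]
    have h0 : 0 ≤ start := by
      have := PySem.Chars.neg_one_le_find (PySem.Chars.lower s) ("{{infobox/jutsu".toList)
      rw [← hstart] at this; omega
    have hle : start.toNat ≤ s.length := by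
      have h1 := PySem.Chars.find_le_length (PySem.Chars.lower s) ("{{infobox/jutsu".toList)
      rw [← hstart] at h1
      have h2 : (PySem.Chars.lower s).length = s.length := by
        simp [PySem.Chars.lower]
      omega
    rw [scan_eq s s.length start.toNat (s.length + 1) 0 (by omega) hle (by omega)]
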